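-- pv_equiv track=rewrite | github.com/pypi-data/pypi-mirror-375 | packages/valuascript-compiler/valuascript_compiler-2.1.0.tar.gz/valuascript_compiler-2.1.0/vsc/optimizer.py | _find_live_variables
-- ===== SOURCE A (Python) =====
-- from collections import deque
--
-- def _find_live_variables(output_var, dependencies):
--     """Finds all variables that the final output variable depends on."""
--     live_vars = set()
--     queue = deque([output_var])
--     while queue:
--         current_var = queue.popleft()
--         if current_var not in live_vars:
--             live_vars.add(current_var)
--             for dep in dependencies.get(current_var, []):
--                 queue.append(dep)
--     return live_vars
-- ===== SOURCE B (Python) =====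
-- def _find_live_variables(output_var, dependencies):
--     """Finds all variables that the final output variable depends on.
--
--     Naive (Kleene) fixed-point iteration instead of a worklist: each round
--     rebuilds the whole expansion stream (the output variable followed by the
--     dependencies of every variable found so far) from scratch and keeps its
--     first occurrences, stopping when the list no longer changes.  There is no
--     queue and no visited-set guard during traversal.
--     """
--     order = []
--     while True:
--         stream = [output_var]
--         for v in order:
--             stream += dependencies.get(v, [])
--         new_order = []
--         seen = set()
--         for x in stream:
--             if x not in seen:
--                 new_order.append(x)
--                 seen.add(x)
--         if new_order == order:
--             return seen
--         order = new_order
-- ===== Notes on version B (the rewrite author's own statement) =====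
-- stated objective: alternative
-- what changed: The deque worklist BFS is replaced by naive Kleene fixed-point iteration: each round rebuilds the entire expansion stream (output variable followed by the dependencies of every variable found so far) from scratch and first-occurrence-dedups it, stopping when the list no longer changes; there is no queue and no visited-set guard during traversal.
import Mathlib
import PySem

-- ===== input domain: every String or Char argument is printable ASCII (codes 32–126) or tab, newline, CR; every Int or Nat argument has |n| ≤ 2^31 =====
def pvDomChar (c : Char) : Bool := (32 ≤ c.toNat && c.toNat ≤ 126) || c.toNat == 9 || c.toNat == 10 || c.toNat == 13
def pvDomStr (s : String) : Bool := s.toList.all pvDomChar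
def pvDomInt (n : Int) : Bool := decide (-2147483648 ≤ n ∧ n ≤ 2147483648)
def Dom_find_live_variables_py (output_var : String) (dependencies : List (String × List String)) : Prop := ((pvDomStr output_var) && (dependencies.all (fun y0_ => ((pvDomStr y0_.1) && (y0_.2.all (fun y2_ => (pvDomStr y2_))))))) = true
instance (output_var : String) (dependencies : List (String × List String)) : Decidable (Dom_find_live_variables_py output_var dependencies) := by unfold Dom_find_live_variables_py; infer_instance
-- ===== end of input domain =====

-- B replaces the deque worklist BFS by naive Kleene fixed-point iteration (whole-stream
-- re-expansion and dedup each round; an alternative of different structure, return value proved equal).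


-- dependencies.get(v, []) — first-match association-list lookup, shared by both ports
def pvDget (deps : List (String × List String)) (x : String) : List String :=
  (PySem.Dict.mk deps).getD x []

-- ===== PORT A =====
-- the while-queue loop of A; fuel is a totality guard only (proved never to run out below)
def pvBfs (deps : List (String × List String)) :
    Nat → PySem.Set String → List String → List String
  | 0, live, _ => live
  | _ + 1, live, [] => live
  | fuel + 1, live, v :: rest =>
    if PySem.Set.contains live v then pvBfs deps fuel live rest
    else pvBfs deps fuel (PySem.Set.add live v) (rest ++ pvDget deps v)

def find_live_variables_py (output_var : String) (dependencies : List (String × List String)) : List String :=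
  pvBfs dependencies ((dependencies.map (fun p => p.2.length)).sum + 1) PySem.Set.empty [output_var]

-- ===== PORT B =====
-- body of B's inner dedup loop: new_order list and seen set, extended together
def pvDedupStep (st : List String × PySem.Set String) (x : String) : List String × PySem.Set String :=
  if PySem.Set.contains st.2 x then st else (st.1 ++ [x], PySem.Set.add st.2 x)

-- B's 'while True' fixpoint loop; fuel is a totality guard only (proved never to run out below)
def pvIter (deps : List (String × List String)) (out : String) :
    Nat → List String → List String
  | 0, order => order
  | fuel + 1, order =>
    let stream := order.foldl (fun s v => s ++ pvDget deps v) [out]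
    let st := stream.foldl pvDedupStep ([], PySem.Set.empty)
    if st.1 = order then st.2 else pvIter deps out fuel st.1

def find_live_variables_py_alt (output_var : String) (dependencies : List (String × List String)) : List String :=
  pvIter dependencies output_var (dependencies.length + 2) []

-- ===== PRECONDITION & SPEC =====
def Spec_find_live_variables_py (output_var : String) (dependencies : List (String × List String)) (out : List String) : Prop := out = find_live_variables_py_alt output_var dependencies
instance (output_var : String) (dependencies : List (String × List String)) (out : List String) : Decidable (Spec_find_live_variables_py output_var dependencies out) := by unfold Spec_find_live_variables_py; infer_instance

-- ===== CLAIM (what is proved, stated in full; the proofs are below) =====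
def Claim_equal_find_live_variables_py : Prop := ∀ (output_var : String) (dependencies : List (String × List String)), Dom_find_live_variables_py output_var dependencies → Spec_find_live_variables_py output_var dependencies (find_live_variables_py output_var dependencies)

-- ===== LEMMAS AND PROOFS =====

-- ghost intermediate for the proof only: one level-synchronous expansion step
def pvVisit (deps : List (String × List String))
    (st : PySem.Set String × List String) (v : String) : PySem.Set String × List String :=
  if PySem.Set.contains st.1 v then st
  else (PySem.Set.add st.1 v, st.2 ++ pvDget deps v)

-- ghost intermediate for the proof only: level-synchronous BFS
def pvExpand (deps : List (String × List String)) :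
    Nat → PySem.Set String → List String → List String
  | 0, live, _ => live
  | _ + 1, live, [] => live
  | fuel + 1, live, frontier =>
    let st := frontier.foldl (pvVisit deps) (live, [])
    pvExpand deps fuel st.1 st.2

-- total dependency size still "chargeable": Σ |deps(k)| over pairs whose key is not yet live
def pvRem (deps : List (String × List String)) (live : List String) : Nat :=
  match deps with
  | [] => 0
  | (k, ds) :: rest => (if k ∈ live then 0 else ds.length) + pvRem rest live

-- number of pairs whose key is not yet live
def pvKB (deps : List (String × List String)) (live : List String) : Nat :=
  match deps with
  | [] => 0
  | (k, _) :: rest => (if k ∈ live then 0 else 1) + pvKB rest live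

theorem pvDget_cons (k : String) (ds : List String) (rest : List (String × List String)) (x : String) :
    pvDget ((k, ds) :: rest) x = if k = x then ds else pvDget rest x := by
  simp [pvDget, PySem.Dict.getD, PySem.Dict.get?_mk_cons]
  split <;> simp

theorem pvRem_mono (deps : List (String × List String)) (s t : List String)
    (h : ∀ y, y ∈ s → y ∈ t) : pvRem deps t ≤ pvRem deps s := by
  induction deps with
  | nil => simp [pvRem]
  | cons p rest ih =>
    obtain ⟨k, ds⟩ := p
    simp only [pvRem]
    by_cases hk : k ∈ s
    · simp [hk, h k hk]; exact ih
    · simp only [if_neg hk]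
      have h2 : (if k ∈ t then 0 else ds.length) ≤ ds.length := by split <;> omega
      omega

theorem pvKB_mono (deps : List (String × List String)) (s t : List String)
    (h : ∀ y, y ∈ s → y ∈ t) : pvKB deps t ≤ pvKB deps s := by
  induction deps with
  | nil => simp [pvKB]
  | cons p rest ih =>
    obtain ⟨k, ds⟩ := p
    simp only [pvKB]
    by_cases hk : k ∈ s
    · simp [hk, h k hk]; exact ih
    · simp only [if_neg hk]
      have h2 : (if k ∈ t then 0 else 1) ≤ 1 := by split <;> omega
      omega

theorem pvRem_add (deps : List (String × List String)) (live : List String) (x : String)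
    (hx : x ∉ live) : (pvDget deps x).length + pvRem deps (live ++ [x]) ≤ pvRem deps live := by
  induction deps with
  | nil => simp [pvRem, pvDget, PySem.Dict.getD, PySem.Dict.get?]
  | cons p rest ih =>
    obtain ⟨k, ds⟩ := p
    rw [pvDget_cons]
    by_cases hk : k = x
    · subst hk
      have h1 : pvRem rest (live ++ [k]) ≤ pvRem rest live :=
        pvRem_mono rest live (live ++ [k]) (by intro y hy; simp [hy])
      simp [pvRem, hx]
      omega
    · simp only [pvRem, if_neg hk]
      have hmem : (k ∈ live ++ [x]) ↔ (k ∈ live) := by simp [hk]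
      by_cases hkl : k ∈ live
      · simp [hkl, hmem.mpr hkl]; omega
      · have : k ∉ live ++ [x] := by simp [hkl, hk]
        simp [hkl, this]; omega

theorem pvKB_add_lt (deps : List (String × List String)) (live : List String) (x : String)
    (hx : x ∉ live) (hd : pvDget deps x ≠ []) :
    pvKB deps (live ++ [x]) < pvKB deps live := by
  induction deps with
  | nil => simp [pvDget, PySem.Dict.getD, PySem.Dict.get?] at hd
  | cons p rest ih =>
    obtain ⟨k, ds⟩ := p
    rw [pvDget_cons] at hd
    by_cases hk : k = x
    · subst hk
      have h1 : pvKB rest (live ++ [k]) ≤ pvKB rest live :=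
        pvKB_mono rest live (live ++ [k]) (by intro y hy; simp [hy])
      simp [pvKB, hx]
      omega
    · rw [if_neg hk] at hd
      have h1 := ih hd
      simp only [pvKB]
      have hmem : (k ∈ live ++ [x]) ↔ (k ∈ live) := by simp [hk]
      by_cases hkl : k ∈ live
      · simp [hkl, hmem.mpr hkl]; omega
      · have : k ∉ live ++ [x] := by simp [hkl, hk]
        simp [hkl, this]; omega

theorem pvBfs_nil (deps : List (String × List String)) (n : Nat) (live : PySem.Set String) :
    pvBfs deps n live [] = live := by cases n <;> rfl

theorem pvExpand_nil (deps : List (String × List String)) (n : Nat) (live : PySem.Set String) :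
    pvExpand deps n live [] = live := by cases n <;> rfl

theorem pvContains_eq (live : List String) (v : String) :
    PySem.Set.contains live v = decide (v ∈ live) := by
  simp [PySem.Set.contains, List.contains_eq_mem]

theorem pvAdd_eq (live : List String) (v : String) (hv : v ∉ live) :
    PySem.Set.add live v = live ++ [v] := by
  simp [PySem.Set.add, hv]

theorem pvAdd_mem (live : List String) (v : String) (hv : v ∈ live) :
    PySem.Set.add live v = live := by
  simp [PySem.Set.add, hv]

theorem pvVisit_pos (deps : List (String × List String)) (st : PySem.Set String × List String)
    (v : String) (h : v ∈ st.1) : pvVisit deps st v = st := by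
  simp [pvVisit, h]

theorem pvVisit_neg (deps : List (String × List String)) (st : PySem.Set String × List String)
    (v : String) (h : v ∉ st.1) : pvVisit deps st v = (st.1 ++ [v], st.2 ++ pvDget deps v) := by
  simp [pvVisit, h]

-- the result and fuel: pvBfs is fuel-independent once fuel covers queue length + pvRem
theorem pvBfs_stable (deps : List (String × List String)) :
    ∀ (n m : Nat) (live q : List String),
      q.length + pvRem deps live ≤ n → q.length + pvRem deps live ≤ m →
      pvBfs deps n live q = pvBfs deps m live q := by
  intro n
  induction n with
  | zero =>
    intro m live q hn _
    have : q = [] := by cases q <;> simp_all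
    subst this
    rw [pvBfs_nil, pvBfs_nil]
  | succ n ih =>
    intro m live q hn hm
    cases q with
    | nil => rw [pvBfs_nil, pvBfs_nil]
    | cons v rest =>
      cases m with
      | zero => simp at hm
      | succ m =>
        simp only [pvBfs, pvContains_eq]
        by_cases hv : v ∈ live
        · simp only [hv, decide_true, if_true]
          exact ih m live rest (by simp at hn; omega) (by simp at hm; omega)
        · simp only [hv, decide_false, pvAdd_eq live v hv]
          have hstep := pvRem_add deps live v hv
          exact ih m (live ++ [v]) (rest ++ pvDget deps v)
            (by simp at hn ⊢; omega) (by simp at hm ⊢; omega)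

-- the accumulator of the ghost inner fold is append-homomorphic, and the live set ignores it
theorem pvFold_acc (deps : List (String × List String)) :
    ∀ (f : List String) (live : PySem.Set String) (c : List String),
      f.foldl (pvVisit deps) (live, c) =
        ((f.foldl (pvVisit deps) (live, [])).1, c ++ (f.foldl (pvVisit deps) (live, [])).2) := by
  intro f
  induction f with
  | nil => intro live c; simp
  | cons v f' ih =>
    intro live c
    by_cases hv : v ∈ live
    · rw [List.foldl_cons, List.foldl_cons, pvVisit_pos deps (live, c) v hv,
          pvVisit_pos deps (live, []) v hv]
      exact ih live c
    · rw [List.foldl_cons, List.foldl_cons, pvVisit_neg deps (live, c) v hv,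
          pvVisit_neg deps (live, []) v hv]
      simp only [List.nil_append]
      rw [ih (live ++ [v]) (c ++ pvDget deps v), ih (live ++ [v]) (pvDget deps v)]
      simp

-- processing one frontier prefix of the queue equals one pvVisit pass over it
theorem pvBfs_level (deps : List (String × List String)) :
    ∀ (f q live : List String) (m : Nat),
      pvBfs deps (f.length + m) live (f ++ q) =
        pvBfs deps m (f.foldl (pvVisit deps) (live, [])).1
          (q ++ (f.foldl (pvVisit deps) (live, [])).2) := by
  intro f
  induction f with
  | nil => intro q live m; simp
  | cons v f' ih =>
    intro q live m
    have hlen : (v :: f').length + m = (f'.length + m) + 1 := by simp; omega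
    rw [hlen]
    simp only [List.cons_append, pvBfs, List.foldl_cons, pvContains_eq]
    by_cases hv : v ∈ live
    · simp only [hv, decide_true, if_true, pvVisit_pos deps (live, ([] : List String)) v hv]
      exact ih q live m
    · simp only [hv, decide_false, Bool.false_eq_true, if_false,
        pvVisit_neg deps (live, ([] : List String)) v hv, List.nil_append,
        pvAdd_eq live v hv]
      rw [List.append_assoc]
      rw [ih (q ++ pvDget deps v) (live ++ [v]) m]
      rw [pvFold_acc deps f' (live ++ [v]) (pvDget deps v)]
      simp

theorem pvFold_mono (deps : List (String × List String)) :
    ∀ (f : List String) (live : List String) (y : String),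
      y ∈ live → y ∈ (f.foldl (pvVisit deps) (live, [])).1 := by
  intro f
  induction f with
  | nil => intro live y hy; simpa using hy
  | cons v f' ih =>
    intro live y hy
    by_cases hv : v ∈ live
    · rw [List.foldl_cons, pvVisit_pos deps (live, []) v hv]
      exact ih live y hy
    · rw [List.foldl_cons, pvVisit_neg deps (live, []) v hv]
      simp only [List.nil_append]
      rw [pvFold_acc deps f' (live ++ [v]) (pvDget deps v)]
      exact ih (live ++ [v]) y (by simp [hy])

-- a nonempty next frontier means this level consumed at least one dependency key
theorem pvFold_next_ne (deps : List (String × List String)) :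
    ∀ (f live : List String),
      (f.foldl (pvVisit deps) (live, [])).2 ≠ [] →
      pvKB deps (f.foldl (pvVisit deps) (live, [])).1 < pvKB deps live := by
  intro f
  induction f with
  | nil => intro live h; simp at h
  | cons v f' ih =>
    intro live h
    by_cases hv : v ∈ live
    · rw [List.foldl_cons, pvVisit_pos deps (live, []) v hv] at h ⊢
      exact ih live h
    · have hvn : v ∉ live := hv
      rw [List.foldl_cons, pvVisit_neg deps (live, []) v hv] at h ⊢
      simp only [List.nil_append] at h ⊢
      rw [pvFold_acc deps f' (live ++ [v]) (pvDget deps v)] at h ⊢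
      simp only at h ⊢
      have hsub : pvKB deps (f'.foldl (pvVisit deps) (live ++ [v], [])).1 ≤ pvKB deps (live ++ [v]) :=
        pvKB_mono deps (live ++ [v]) _ (fun y hy => pvFold_mono deps f' (live ++ [v]) y hy)
      by_cases hd : pvDget deps v = []
      · rw [hd] at h; simp at h
        have := ih (live ++ [v]) h
        have hle : pvKB deps (live ++ [v]) ≤ pvKB deps live :=
          pvKB_mono deps live (live ++ [v]) (by intro y hy; simp [hy])
        omega
      · have := pvKB_add_lt deps live v hvn hd
        omega

-- the A-side bridge: with sufficient fuel on both sides, queue BFS equals level expansion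
theorem pvMain (deps : List (String × List String)) :
    ∀ (LB : Nat) (live f : List String) (n : Nat),
      f.length + pvRem deps live ≤ n → pvKB deps live + 2 ≤ LB →
      pvBfs deps n live f = pvExpand deps LB live f := by
  intro LB
  induction LB with
  | zero => intro live f n _ hk; omega
  | succ LB ih =>
    intro live f n hn hk
    cases f with
    | nil => rw [pvBfs_nil]; rfl
    | cons v fs =>
      have hstep :
          pvExpand deps (LB + 1) live (v :: fs) =
            pvExpand deps LB ((v :: fs).foldl (pvVisit deps) (live, [])).1
              ((v :: fs).foldl (pvVisit deps) (live, [])).2 := rfl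
      rw [hstep]
      set F : List String := v :: fs with hF
      set st := F.foldl (pvVisit deps) (live, []) with hst
      have hrem1 : pvRem deps st.1 ≤ pvRem deps live :=
        pvRem_mono deps live st.1 (fun y hy => pvFold_mono deps F live y hy)
      have h1 : pvBfs deps n live F = pvBfs deps (F.length + (pvRem deps live + st.2.length)) live F :=
        pvBfs_stable deps n _ live F hn (by omega)
      have h2 : pvBfs deps (F.length + (pvRem deps live + st.2.length)) live F =
          pvBfs deps (pvRem deps live + st.2.length) st.1 ([] ++ st.2) := by
        have := pvBfs_level deps F [] live (pvRem deps live + st.2.length)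
        rw [List.append_nil] at this
        exact this
      rw [h1, h2]
      simp only [List.nil_append]
      cases hq : st.2 with
      | nil =>
        rw [pvBfs_nil]
        obtain ⟨LB', rfl⟩ : ∃ LB', LB = LB' + 1 := ⟨LB - 1, by omega⟩
        rfl
      | cons w ws =>
        have hne : st.2 ≠ [] := by rw [hq]; simp
        have hkb : pvKB deps st.1 < pvKB deps live := pvFold_next_ne deps F live hne
        rw [← hq]
        exact ih st.1 st.2 (pvRem deps live + st.2.length) (by omega) (by omega)

theorem pvRem_empty (deps : List (String × List String)) :
    pvRem deps [] = (deps.map (fun p => p.2.length)).sum := by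
  induction deps with
  | nil => rfl
  | cons p rest ih => obtain ⟨k, ds⟩ := p; simp [pvRem, ih]

theorem pvKB_empty (deps : List (String × List String)) : pvKB deps [] = deps.length := by
  induction deps with
  | nil => rfl
  | cons p rest ih => obtain ⟨k, ds⟩ := p; simp [pvKB, ih]; omega

-- ===== B-side lemmas: the fixpoint loop against the ghost level expansion =====

-- B's inner dedup fold stays diagonal: list and seen-set hold the same elements
theorem pvDedup_diag :
    ∀ (s : List String) (d : List String),
      s.foldl pvDedupStep (d, d) = (s.foldl PySem.Set.add d, s.foldl PySem.Set.add d) := by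
  intro s
  induction s with
  | nil => intro d; rfl
  | cons x s' ih =>
    intro d
    by_cases hx : x ∈ d
    · rw [List.foldl_cons, List.foldl_cons]
      have h1 : pvDedupStep (d, d) x = (d, d) := by
        simp [pvDedupStep, hx]
      have h2 : PySem.Set.add d x = d := pvAdd_mem d x hx
      rw [h1, h2]; exact ih d
    · rw [List.foldl_cons, List.foldl_cons]
      have h1 : pvDedupStep (d, d) x = (d ++ [x], d ++ [x]) := by
        simp [pvDedupStep, hx]
      have h2 : PySem.Set.add d x = d ++ [x] := pvAdd_eq d x hx
      rw [h1, h2]; exact ih (d ++ [x])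

-- folding appends equals flatMap
theorem pvStream_eq (deps : List (String × List String)) :
    ∀ (l : List String) (a : List String),
      l.foldl (fun s v => s ++ pvDget deps v) a = a ++ l.flatMap (pvDget deps) := by
  intro l
  induction l with
  | nil => intro a; simp
  | cons v l' ih => intro a; rw [List.foldl_cons, ih]; simp

-- foldl Set.add only appends: the start list is a prefix
theorem pvAddAll_prefix :
    ∀ (f L : List String), ∃ t, f.foldl PySem.Set.add L = L ++ t := by
  intro f
  induction f with
  | nil => intro L; exact ⟨[], by simp⟩
  | cons x f' ih =>
    intro L
    by_cases hx : x ∈ L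
    · rw [List.foldl_cons, pvAdd_mem L x hx]; exact ih L
    · rw [List.foldl_cons, pvAdd_eq L x hx]
      obtain ⟨t, ht⟩ := ih (L ++ [x])
      exact ⟨x :: t, by rw [ht]; simp⟩

-- first component of the ghost pvVisit fold is foldl Set.add
theorem pvVisit_fst (deps : List (String × List String)) :
    ∀ (f : List String) (L : PySem.Set String),
      (f.foldl (pvVisit deps) (L, [])).1 = f.foldl PySem.Set.add L := by
  intro f
  induction f with
  | nil => intro L; rfl
  | cons v f' ih =>
    intro L
    by_cases hv : v ∈ L
    · rw [List.foldl_cons, pvVisit_pos deps (L, []) v hv, List.foldl_cons, pvAdd_mem L v hv]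
      exact ih L
    · rw [List.foldl_cons, pvVisit_neg deps (L, []) v hv, List.foldl_cons, pvAdd_eq L v hv]
      simp only [List.nil_append]
      rw [pvFold_acc deps f' (L ++ [v]) (pvDget deps v)]
      exact ih (L ++ [v])

-- second component of the ghost pvVisit fold: dependencies of exactly the newly added elements
theorem pvVisit_snd (deps : List (String × List String)) :
    ∀ (f : List String) (L : PySem.Set String),
      (f.foldl (pvVisit deps) (L, [])).2 =
        ((f.foldl PySem.Set.add L).drop L.length).flatMap (pvDget deps) := by
  intro f
  induction f with
  | nil => intro L; simp
  | cons v f' ih =>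
    intro L
    by_cases hv : v ∈ L
    · rw [List.foldl_cons, pvVisit_pos deps (L, []) v hv, List.foldl_cons, pvAdd_mem L v hv]
      exact ih L
    · rw [List.foldl_cons, pvVisit_neg deps (L, []) v hv, List.foldl_cons, pvAdd_eq L v hv]
      simp only [List.nil_append]
      rw [pvFold_acc deps f' (L ++ [v]) (pvDget deps v)]
      simp only
      rw [ih (L ++ [v])]
      obtain ⟨t, ht⟩ := pvAddAll_prefix f' (L ++ [v])
      rw [ht]
      have h1 : ((L ++ [v]) ++ t).drop (L ++ [v]).length = t := by
        simp
      have h2 : ((L ++ [v]) ++ t).drop L.length = v :: t := by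
        rw [List.append_assoc]
        rw [List.drop_left]
        simp
      rw [h1, h2]
      simp

-- the B-side bridge (lockstep in fuel): the fixpoint loop equals the ghost level expansion
theorem pvIterExpand (deps : List (String × List String)) (out : String) :
    ∀ (f : Nat) (live frontier : List String),
      frontier.foldl PySem.Set.add live =
        ([out] ++ live.flatMap (pvDget deps)).foldl PySem.Set.add [] →
      pvIter deps out f live = pvExpand deps f live frontier := by
  intro f
  induction f with
  | zero => intro live frontier _; rfl
  | succ f ih =>
    intro live frontier hinv
    have hstream : live.foldl (fun s v => s ++ pvDget deps v) [out] =
        [out] ++ live.flatMap (pvDget deps) := pvStream_eq deps live [out]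
    have hdedup : (live.foldl (fun s v => s ++ pvDget deps v) [out]).foldl pvDedupStep
          ([], PySem.Set.empty) =
        (frontier.foldl PySem.Set.add live, frontier.foldl PySem.Set.add live) := by
      have h0 : (([] : List String), (PySem.Set.empty : PySem.Set String)) =
          ((([] : List String)), ([] : List String)) := rfl
      rw [hstream, h0, pvDedup_diag, ← hinv]
    have hiter : pvIter deps out (f + 1) live =
        (if frontier.foldl PySem.Set.add live = live then frontier.foldl PySem.Set.add live
         else pvIter deps out f (frontier.foldl PySem.Set.add live)) := by
      show (if ((live.foldl (fun s v => s ++ pvDget deps v) [out]).foldl pvDedupStep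
              ([], PySem.Set.empty)).1 = live
            then ((live.foldl (fun s v => s ++ pvDget deps v) [out]).foldl pvDedupStep
              ([], PySem.Set.empty)).2
            else pvIter deps out f
              (((live.foldl (fun s v => s ++ pvDget deps v) [out]).foldl pvDedupStep
                ([], PySem.Set.empty)).1)) = _
      rw [hdedup]
    rw [hiter]
    obtain ⟨t, ht⟩ := pvAddAll_prefix frontier live
    cases hf : frontier with
    | nil =>
      rw [show List.foldl PySem.Set.add live ([] : List String) = live from rfl,
          if_pos rfl, pvExpand_nil]
    | cons w ws =>
      rw [← hf]
      have hexp : pvExpand deps (f + 1) live frontier =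
          pvExpand deps f (frontier.foldl (pvVisit deps) (live, [])).1
            (frontier.foldl (pvVisit deps) (live, [])).2 := by rw [hf]; rfl
      rw [hexp, pvVisit_fst deps frontier live, pvVisit_snd deps frontier live]
      by_cases hfix : frontier.foldl PySem.Set.add live = live
      · rw [if_pos hfix]
        have hdrop : (frontier.foldl PySem.Set.add live).drop live.length = [] := by
          rw [hfix]; simp
        rw [hdrop]
        simp only [List.flatMap_nil]
        rw [pvExpand_nil, hfix]
      · rw [if_neg hfix]
        have hdrop : (frontier.foldl PySem.Set.add live).drop live.length = t := by
          rw [ht]; simp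
        rw [hdrop]
        apply ih
        rw [ht]
        have hflat : (live ++ t).flatMap (pvDget deps) =
            live.flatMap (pvDget deps) ++ t.flatMap (pvDget deps) := by simp
        rw [hflat, ← List.append_assoc, List.foldl_append, ← hinv, ht]

-- ===== VERDICT (by name: the statement is the Claim_ definition above) =====
theorem find_live_variables_py_spec : Claim_equal_find_live_variables_py := by
  intro output_var dependencies _
  show find_live_variables_py output_var dependencies = find_live_variables_py_alt output_var dependencies
  unfold find_live_variables_py find_live_variables_py_alt
  have hA : pvBfs dependencies ((dependencies.map (fun p => p.2.length)).sum + 1)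
      PySem.Set.empty [output_var] =
      pvExpand dependencies (dependencies.length + 2) PySem.Set.empty [output_var] :=
    pvMain dependencies (dependencies.length + 2) PySem.Set.empty [output_var]
      ((dependencies.map (fun p => p.2.length)).sum + 1)
      (by simp only [PySem.Set.empty, pvRem_empty, List.length_cons, List.length_nil]; omega)
      (by simp only [PySem.Set.empty, pvKB_empty]; omega)
  have hB : pvIter dependencies output_var (dependencies.length + 2) [] =
      pvExpand dependencies (dependencies.length + 2) PySem.Set.empty [output_var] :=
    pvIterExpand dependencies output_var (dependencies.length + 2) PySem.Set.empty [output_var]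
      (by simp [PySem.Set.empty, PySem.Set.add, PySem.Set.contains])
  rw [hA, ← hB]
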